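-- pv_equiv track=rewrite | github.com/Blockfinity/AnimaFund | ultimus/executor.py | _find_matching_persona
-- ===== SOURCE A (Python) =====
-- from typing import Dict, List
--
-- def _find_matching_persona(role: str, personas: List[Dict]) -> Dict:
--     """Find the simulation persona that matches this role."""
--     role_lower = role.lower()
--     for p in personas:
--         if role_lower in (p.get("role", "") or "").lower() or role_lower in (p.get("name", "") or "").lower():
--             return p
--     # Fuzzy: match on key words
--     role_words = set(role_lower.split())
--     best, best_score = None, 0
--     for p in personas:
--         p_words = set((p.get("role", "") + " " + p.get("name", "")).lower().split())
--         score = len(role_words & p_words)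
--         if score > best_score:
--             best, best_score = p, score
--     return best or (personas[0] if personas else {})
-- ===== SOURCE B (Python) =====
-- from typing import Dict, List
--
-- def _find_matching_persona(role: str, personas: List[Dict]) -> Dict:
--     """Single pass: substring match returns immediately; otherwise score word overlap."""
--     role_lower = role.lower()
--     role_words = set(role_lower.split())
--     best = None
--     best_score = 0
--     for p in personas:
--         role_s = (p.get("role") or "").lower()
--         name_s = (p.get("name") or "").lower()
--         if role_lower in role_s or role_lower in name_s:
--             return p
--         score = len(role_words & set((role_s + " " + name_s).split()))
--         if score > best_score:
--             best = p
--             best_score = score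
--     if best is not None:
--         return best
--     return personas[0] if personas else {}
-- ===== Notes on version B (the rewrite author's own statement) =====
-- stated objective: simpler
-- what changed: The two separate passes (substring scan, then fuzzy word-overlap scan) are fused into one loop that lowercases each persona's role/name ONCE and reuses them for both the substring test (immediate return) and the overlap score, replacing 'best or ...' with an explicit None check.
import Mathlib
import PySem

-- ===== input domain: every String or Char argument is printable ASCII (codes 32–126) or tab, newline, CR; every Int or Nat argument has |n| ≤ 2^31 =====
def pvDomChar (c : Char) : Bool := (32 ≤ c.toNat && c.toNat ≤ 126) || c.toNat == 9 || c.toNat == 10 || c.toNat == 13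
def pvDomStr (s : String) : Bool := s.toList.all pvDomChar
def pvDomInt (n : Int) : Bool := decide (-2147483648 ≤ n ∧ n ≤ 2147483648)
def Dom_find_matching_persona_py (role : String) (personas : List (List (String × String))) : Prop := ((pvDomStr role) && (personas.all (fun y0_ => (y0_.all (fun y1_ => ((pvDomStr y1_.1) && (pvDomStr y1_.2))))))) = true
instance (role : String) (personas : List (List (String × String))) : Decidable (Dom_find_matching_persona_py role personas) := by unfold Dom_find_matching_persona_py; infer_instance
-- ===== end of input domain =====

-- B fuses A's two passes (substring scan, then word-overlap scan) into one loop that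
-- lowercases each persona's fields once and reuses them; objective: simpler.

-- ===== PORT A =====
-- each persona dict arrives as an association list; its dict value is Dict.ofList
-- (duplicate keys: last value wins, first position kept — as Python dict construction).
-- 'p.get(k, "")' ; the Python '(… or "")' is the identity on a string defaulted to "".
def fmpGet (d : PySem.Dict String String) (k : String) : String := d.getD k ""

-- the predicate of A's first loop: role_lower in p.role.lower() or role_lower in p.name.lower()
def fmpSub (role_lower : List Char) (p : List (String × String)) : Bool :=
  let d := PySem.Dict.ofList p
  PySem.Chars.isIn role_lower (PySem.Chars.lower (fmpGet d "role").toList)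
    || PySem.Chars.isIn role_lower (PySem.Chars.lower (fmpGet d "name").toList)

-- the body of A's second loop: score = len(role_words & p_words); keep (p, score) if score > best_score
def fmpStep (role_words : PySem.Set (List Char))
    (acc : Option (PySem.Dict String String) × Int) (p : List (String × String)) :
    Option (PySem.Dict String String) × Int :=
  let d := PySem.Dict.ofList p
  let p_words := PySem.Set.ofList (PySem.Chars.split₀ (PySem.Chars.lower
      ((fmpGet d "role").toList ++ ' ' :: (fmpGet d "name").toList)))
  let score := PySem.Set.len (PySem.Set.inter role_words p_words)
  if score > acc.2 then (some d, score) else acc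

def find_matching_persona_py (role : String) (personas : List (List (String × String))) : List (String × String) :=
  let role_lower := PySem.Chars.lower role.toList
  match personas.find? (fun p => fmpSub role_lower p) with
  | some p => (PySem.Dict.ofList p).items
  | none =>
    let role_words := PySem.Set.ofList (PySem.Chars.split₀ role_lower)
    let r := personas.foldl (fmpStep role_words) (none, 0)
    -- 'best or …': when best is set its score is > 0, so the dict is nonempty (truthy); None otherwise
    match r.1 with
    | some d => d.items
    | none =>
      match personas with
      | [] => []
      | p :: _ => (PySem.Dict.ofList p).items

-- ===== PORT B =====
-- '(p.get(k) or "").lower()' of Source B, computed once per field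
def fmpAltField (p : List (String × String)) (k : String) : List Char :=
  PySem.Chars.lower ((PySem.Dict.ofList p).getD k "").toList

def fmpAltLoop (role_lower : List Char) (role_words : PySem.Set (List Char))
    (best : Option (PySem.Dict String String)) (best_score : Int) :
    List (List (String × String)) → Option (PySem.Dict String String)
  | [] => best
  | p :: rest =>
    let role_s := fmpAltField p "role"
    let name_s := fmpAltField p "name"
    if PySem.Chars.isIn role_lower role_s || PySem.Chars.isIn role_lower name_s then
      some (PySem.Dict.ofList p)
    else
      let score := PySem.Set.len (PySem.Set.inter role_words
        (PySem.Set.ofList (PySem.Chars.split₀ (role_s ++ ' ' :: name_s))))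
      if score > best_score then
        fmpAltLoop role_lower role_words (some (PySem.Dict.ofList p)) score rest
      else
        fmpAltLoop role_lower role_words best best_score rest

def find_matching_persona_py_alt (role : String) (personas : List (List (String × String))) : List (String × String) :=
  let role_lower := PySem.Chars.lower role.toList
  let role_words := PySem.Set.ofList (PySem.Chars.split₀ role_lower)
  match fmpAltLoop role_lower role_words none 0 personas with
  | some d => d.items
  | none =>
    match personas with
    | [] => []
    | p :: _ => (PySem.Dict.ofList p).items

-- ===== PRECONDITION & SPEC =====
def Spec_find_matching_persona_py (role : String) (personas : List (List (String × String))) (out : List (String × String)) : Prop := out = find_matching_persona_py_alt role personas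
instance (role : String) (personas : List (List (String × String))) (out : List (String × String)) : Decidable (Spec_find_matching_persona_py role personas out) := by unfold Spec_find_matching_persona_py; infer_instance

-- ===== CLAIM (what is proved, stated in full; the proofs are below) =====
def Claim_equal_find_matching_persona_py : Prop := ∀ (role : String) (personas : List (List (String × String))), Dom_find_matching_persona_py role personas → Spec_find_matching_persona_py role personas (find_matching_persona_py role personas)

-- ===== LEMMAS AND PROOFS =====

-- the two programs build the same word set: lower is per-character, so it commutes with ++ and keeps ' '
theorem fmp_words_eq (a b : List Char) :
    PySem.Chars.lower (a ++ ' ' :: b) = PySem.Chars.lower a ++ ' ' :: PySem.Chars.lower b := by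
  simp [PySem.Chars.lower]
  rfl

-- B's fused loop = A's find?-pass followed by A's fold, for any accumulator
theorem fmpAltLoop_eq (role_lower : List Char) (role_words : PySem.Set (List Char)) :
    ∀ (ps : List (List (String × String))) (best : Option (PySem.Dict String String)) (best_score : Int),
    fmpAltLoop role_lower role_words best best_score ps =
      match ps.find? (fun p => fmpSub role_lower p) with
      | some p => some (PySem.Dict.ofList p)
      | none => (ps.foldl (fmpStep role_words) (best, best_score)).1 := by
  intro ps
  induction ps with
  | nil => intro best best_score; simp [fmpAltLoop]
  | cons p rest ih =>
    intro best best_score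
    by_cases h : fmpSub role_lower p = true
    · have h' : (PySem.Chars.isIn role_lower (fmpAltField p "role")
          || PySem.Chars.isIn role_lower (fmpAltField p "name")) = true := by
        simpa [fmpSub, fmpAltField, fmpGet] using h
      simp [fmpAltLoop, h', h]
    · have h' : (PySem.Chars.isIn role_lower (fmpAltField p "role")
          || PySem.Chars.isIn role_lower (fmpAltField p "name")) = false := by
        simpa [fmpSub, fmpAltField, fmpGet] using (Bool.eq_false_iff.mpr h)
      have hscore :
          PySem.Set.len (PySem.Set.inter role_words
            (PySem.Set.ofList (PySem.Chars.split₀ (fmpAltField p "role" ++ ' ' :: fmpAltField p "name")))) =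
          PySem.Set.len (PySem.Set.inter role_words
            (PySem.Set.ofList (PySem.Chars.split₀ (PySem.Chars.lower
              ((fmpGet (PySem.Dict.ofList p) "role").toList ++ ' ' :: (fmpGet (PySem.Dict.ofList p) "name").toList))))) := by
        rw [fmp_words_eq]
        rfl
      simp only [fmpAltLoop, h', Bool.false_eq_true, if_false, List.find?_cons, h,
        List.foldl_cons]
      rw [hscore]
      simp only [fmpStep, fmpGet]
      split_ifs with hgt
      · simpa using ih _ _
      · simpa using ih _ _

-- ===== VERDICT (by name: the statement is the Claim_ definition above) =====
theorem find_matching_persona_py_spec : Claim_equal_find_matching_persona_py := by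
  intro role personas _
  unfold Spec_find_matching_persona_py
  simp only [find_matching_persona_py, find_matching_persona_py_alt, fmpAltLoop_eq]
  cases hf : List.find? (fun p => fmpSub (PySem.Chars.lower role.toList) p) personas with
  | none => simp only [hf]
  | some p => simp only [hf]
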